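-- pv_equiv track=rewrite | github.com/stOracle/Migrate | Programming/CS303E/play.py | q_16
-- ===== SOURCE A (Python) =====
-- def q_16(size):
-- 	m = []
-- 	for i in range (size):
-- 		row = []
-- 		for j in range (size):
-- 			if ((j == 0) or (j == size - 1) or (i == 0) or (i == size - 1)):
-- 				row.append(1)
-- 			else:
-- 				row.append(0)
-- 		m.append(row)
-- 	return m
-- ===== SOURCE B (Python) =====
-- def q_16(size):
--     m = [[0] * size for _ in range(size)]
--     for i in range(size):
--         m[i][0] = 1
--         m[i][size - 1] = 1
--     for j in range(size):
--         m[0][j] = 1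
--         m[size - 1][j] = 1
--     return m
-- ===== Notes on version B (the rewrite author's own statement) =====
-- stated objective: alternative
-- what changed: Builds an all-zeros matrix via bulk [0]*size row allocation and then overwrites the border in two separate index-assignment passes, instead of deciding each of the n^2 cells with a conditional while appending.
import Mathlib
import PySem

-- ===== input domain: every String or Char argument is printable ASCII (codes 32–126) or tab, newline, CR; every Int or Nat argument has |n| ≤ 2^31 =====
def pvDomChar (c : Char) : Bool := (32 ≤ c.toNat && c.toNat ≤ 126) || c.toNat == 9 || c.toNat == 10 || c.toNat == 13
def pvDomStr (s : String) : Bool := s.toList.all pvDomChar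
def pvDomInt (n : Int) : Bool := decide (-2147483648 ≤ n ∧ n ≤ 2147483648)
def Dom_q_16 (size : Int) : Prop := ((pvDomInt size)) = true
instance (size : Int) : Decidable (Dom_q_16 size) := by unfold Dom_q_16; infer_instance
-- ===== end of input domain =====

-- B builds an all-zeros matrix first and then overwrites the border in two separate
-- index-assignment passes, instead of deciding each cell with a conditional while appending.

-- ===== PORT A =====
def q_16 (size : Int) : List (List Int) :=
  (PySem.List.pyRange 0 size 1).foldl
    (fun m i =>
      m ++ [ (PySem.List.pyRange 0 size 1).foldl
        (fun row j => row ++ [if j = 0 ∨ j = size - 1 ∨ i = 0 ∨ i = size - 1 then (1 : Int) else 0])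
        [] ])
    []

-- ===== PORT B =====
-- Python's `m[i][c] = 1` is an in-place row assignment; since every index used is in range
-- (i, j ∈ range(size), columns 0 and size-1 of length-size rows), pySetD/pyGetD are exact here.
def q_16_alt (size : Int) : List (List Int) :=
  let m0 := (PySem.List.pyRange 0 size 1).map (fun _ => PySem.List.pyRepeat [(0 : Int)] size)
  let m1 := (PySem.List.pyRange 0 size 1).foldl
    (fun m i =>
      let m' := PySem.List.pySetD m i (PySem.List.pySetD (PySem.List.pyGetD m i []) 0 1)
      PySem.List.pySetD m' i (PySem.List.pySetD (PySem.List.pyGetD m' i []) (size - 1) 1))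
    m0
  (PySem.List.pyRange 0 size 1).foldl
    (fun m j =>
      let m' := PySem.List.pySetD m 0 (PySem.List.pySetD (PySem.List.pyGetD m 0 []) j 1)
      PySem.List.pySetD m' (size - 1) (PySem.List.pySetD (PySem.List.pyGetD m' (size - 1) []) j 1))
    m1

-- ===== PRECONDITION & SPEC =====
def Spec_q_16 (size : Int) (out : List (List Int)) : Prop := out = q_16_alt size
instance (size : Int) (out : List (List Int)) : Decidable (Spec_q_16 size out) := by unfold Spec_q_16; infer_instance

-- ===== CLAIM (what is proved, stated in full; the proofs are below) =====
def Claim_equal_q_16 : Prop := ∀ (size : Int), Dom_q_16 size → Spec_q_16 size (q_16 size)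

-- ===== LEMMAS AND PROOFS =====

-- the row A builds for line i, over Nat indices
def rowA (n i : Nat) : List Int :=
  (List.range n).map (fun j => if j = 0 ∨ j = n - 1 ∨ i = 0 ∨ i = n - 1 then (1 : Int) else 0)

-- the interior row: zeros with both ends set to 1
def r1 (n : Nat) : List Int := (((List.replicate n (0 : Int)).set 0 1).set (n - 1) 1)

-- first k cells of r overwritten by 1
def fill (r : List Int) (k : Nat) : List Int := List.replicate k (1 : Int) ++ r.drop k

-- pass 1: each step rewrites only row i, so a fold over range k turns the first k rows of a
-- constant matrix into (g2 (g1 r))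
theorem pass1 (g1 g2 : List Int → List Int) (r : List Int) (n : Nat) :
    ∀ k, k ≤ n →
    (List.range k).foldl
      (fun m i =>
        (m.set i (g1 (m.getD i []))).set i
          (g2 ((m.set i (g1 (m.getD i []))).getD i [])))
      (List.replicate n r)
    = List.replicate k (g2 (g1 r)) ++ List.replicate (n - k) r := by
  intro k hk
  induction k with
  | zero => simp
  | succ k ih =>
    have hk' : k ≤ n := Nat.le_of_succ_le hk
    have hkn : k < n := hk
    rw [List.range_succ, List.foldl_append, ih hk']
    have hdrop : n - k = (n - (k + 1)) + 1 := by omega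
    rw [hdrop, List.replicate_succ]
    simp only [List.foldl_cons, List.foldl_nil]
    simp [List.getD, List.replicate_succ']

-- pass 2 (n ≥ 2): each step rewrites cell j of the first and the last row
theorem pass2 (n : Nat) (hn : 2 ≤ n) (r : List Int) (hr : r.length = n) :
    ∀ k, k ≤ n →
    (List.range k).foldl
      (fun m j =>
        ((m.set 0 ((m.getD 0 []).set j 1)).set (n - 1)
          (((m.set 0 ((m.getD 0 []).set j 1)).getD (n - 1) []).set j 1)))
      (List.replicate n r)
    = fill r k :: List.replicate (n - 2) r ++ [fill r k] := by
  intro k hk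
  induction k with
  | zero =>
    have h : n = (n - 2) + 1 + 1 := by omega
    rw [h, List.replicate_succ, List.replicate_succ']
    simp [fill]
  | succ k ih =>
    have hk' : k ≤ n := Nat.le_of_succ_le hk
    have hkn : k < n := hk
    rw [List.range_succ, List.foldl_append, ih hk']
    simp only [List.foldl_cons, List.foldl_nil]
    have hfill : (fill r k).set k 1 = fill r (k + 1) := by
      unfold fill
      have hd : List.drop k r = r[k] :: List.drop (k + 1) r :=
        List.drop_eq_getElem_cons (by omega)
      rw [List.set_append, hd]
      simp only [List.length_replicate, lt_irrefl, if_false, Nat.sub_self,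
        List.set_cons_zero, List.replicate_succ', List.append_assoc, List.singleton_append]
    have hlen : (List.replicate (n - 2) r).length = n - 2 := by simp
    have hgetlast :
        (fill r (k+1) :: (List.replicate (n - 2) r ++ [fill r k])).getD (n - 1) []
          = fill r k := by
      have h1 : n - 1 = (n - 2) + 1 := by omega
      simp [List.getD, h1, hlen]
    have hsetlast :
        (fill r (k+1) :: (List.replicate (n - 2) r ++ [fill r k])).set (n - 1) (fill r (k+1))
          = fill r (k+1) :: (List.replicate (n - 2) r ++ [fill r (k+1)]) := by
      have h1 : n - 1 = (n - 2) + 1 := by omega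
      simp [h1, hlen]
    simp only [List.cons_append]
    simp only [List.getD_cons_zero, List.set_cons_zero, hfill]
    rw [hgetlast, hfill, hsetlast]

-- helper casts for pySetD/pyGetD at literal index 0
theorem pySetD_zero {α : Type} (xs : List α) (v : α) :
    PySem.List.pySetD xs (0 : Int) v = xs.set 0 v := by
  simpa using PySem.List.pySetD_natCast xs 0 v

theorem pyGetD_zero {α : Type} (xs : List α) (d : α) :
    PySem.List.pyGetD xs (0 : Int) d = xs.getD 0 d := by
  simpa using PySem.List.pyGetD_natCast xs 0 d

-- the interior row equals A's interior row
theorem rowA_interior (n i : Nat) (hi : 0 < i) (hin : i < n - 1) :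
    rowA n i = r1 n := by
  apply List.ext_getElem
  · simp [rowA, r1]
  · intro j h1 h2
    have hjn : j < n := by simpa [rowA] using h1
    simp only [rowA, r1, List.getElem_map, List.getElem_range, List.getElem_set,
      List.getElem_replicate]
    split_ifs <;> omega

theorem rowA_zero (n : Nat) (_hn : 1 ≤ n) : rowA n 0 = List.replicate n 1 := by
  simp [rowA, List.map_const']

theorem rowA_last (n : Nat) : rowA n (n - 1) = List.replicate n 1 := by
  simp [rowA, List.map_const']

theorem fill_full (n : Nat) : fill (r1 n) n = List.replicate n 1 := by
  simp [fill, r1]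

-- A's port, rewritten as a map over Nat range
theorem qA_eq (n : Nat) :
    q_16 ((n : Nat) : Int) = (List.range n).map (rowA n) := by
  unfold q_16
  rw [PySem.List.pyRange_zero_natCast]
  simp only [List.foldl_map, PySem.List.foldl_append_singleton_eq_map, List.nil_append]
  apply List.map_congr_left
  intro i hi
  apply List.map_congr_left
  intro j hj
  simp only [List.mem_range] at hi hj
  have h0 : ((j : Int) = 0) = (j = 0) := by simp
  have h1 : ((i : Int) = 0) = (i = 0) := by simp
  congr 1
  simp only [eq_iff_iff]
  constructor <;> intro h <;> rcases h with h | h | h | h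
  · exact Or.inl (by exact_mod_cast h)
  · exact Or.inr (Or.inl (by omega))
  · exact Or.inr (Or.inr (Or.inl (by exact_mod_cast h)))
  · exact Or.inr (Or.inr (Or.inr (by omega)))
  · exact Or.inl (by exact_mod_cast h)
  · exact Or.inr (Or.inl (by omega))
  · exact Or.inr (Or.inr (Or.inl (by exact_mod_cast h)))
  · exact Or.inr (Or.inr (Or.inr (by omega)))

-- B's port, evaluated: for n ≥ 2
theorem qB_eq (n : Nat) (hn : 2 ≤ n) :
    q_16_alt (n : Int) =
      List.replicate n 1 :: List.replicate (n - 2) (r1 n) ++ [List.replicate n 1] := by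
  unfold q_16_alt
  have hcast : ((n : Int) - 1) = (((n - 1 : Nat)) : Int) := by omega
  rw [PySem.List.pyRange_zero_natCast]
  simp only [List.foldl_map, List.map_map,
    PySem.List.pyRepeat_singleton,
    hcast, PySem.List.pySetD_natCast, PySem.List.pyGetD_natCast,
    pySetD_zero, pyGetD_zero, Int.toNat_natCast]
  have hm0 : List.map ((fun _ => List.replicate n (0 : Int)) ∘ (fun k : Nat => (k : Int)))
      (List.range n) = List.replicate n (List.replicate n 0) := by
    simp [Function.comp_def, List.map_const']
  rw [hm0,
    pass1 (fun r => r.set 0 1) (fun r => r.set (n - 1) 1) (List.replicate n 0) n n (le_refl n)]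
  simp only [Nat.sub_self, List.replicate_zero, List.append_nil]
  rw [pass2 n hn _ (by simp [List.length_set]) n (le_refl n)]
  rw [show ((List.replicate n (0:Int)).set 0 1).set (n-1) 1 = r1 n from rfl, fill_full]

-- the assembled A-side for n ≥ 2
theorem qA_assembled (n : Nat) (hn : 2 ≤ n) :
    (List.range n).map (rowA n) =
      List.replicate n 1 :: List.replicate (n - 2) (r1 n) ++ [List.replicate n 1] := by
  obtain ⟨m, rfl⟩ : ∃ m, n = m + 2 := ⟨n - 2, by omega⟩
  rw [show List.range (m + 2) = List.range (m + 1) ++ [m + 1] from List.range_succ,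
    List.range_succ_eq_map, List.map_append, List.map_cons, List.map_map]
  have hmid : (List.range m).map (rowA (m + 2) ∘ Nat.succ)
      = List.replicate m (r1 (m + 2)) := by
    rw [List.eq_replicate_iff]
    constructor
    · simp
    · intro b hb
      simp only [List.mem_map, List.mem_range] at hb
      obtain ⟨i, hi, rfl⟩ := hb
      exact rowA_interior (m + 2) (i + 1) (by omega) (by omega)
  rw [hmid, rowA_zero (m + 2) (by omega)]
  have hlastrow : rowA (m + 2) (m + 1) = List.replicate (m + 2) 1 := by
    have h : m + 1 = (m + 2) - 1 := by omega
    rw [h, rowA_last]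
  simp [hlastrow]

-- ===== VERDICT (by name: the statement is the Claim_ definition above) =====
theorem q_16_spec : Claim_equal_q_16 := by
  intro size _
  unfold Spec_q_16
  by_cases hpos : 0 < size
  · obtain ⟨n, rfl⟩ : ∃ n : Nat, size = (n : Int) := ⟨size.toNat, by omega⟩
    have hn1 : 1 ≤ n := by exact_mod_cast hpos
    by_cases h2 : 2 ≤ n
    · rw [qA_eq n, qA_assembled n h2, qB_eq n h2]
    · have h1 : n = 1 := by omega
      subst h1
      decide
  · have hnil : PySem.List.pyRange 0 size 1 = [] :=
      PySem.List.pyRange_one_eq_nil (by omega)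
    simp [q_16, q_16_alt, hnil]
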